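-- pv_equiv track=rewrite | github.com/sundar91/dsa | Stack/sum-max-min.py | solve
-- ===== SOURCE A (Python) =====
-- from collections import deque
--
-- def solve(A, B):
--     n = len(A)
--     minQ = deque()
--     maxQ = deque()
--     mod = pow(10, 9) + 7
--     s = 0
--
--     for i in range(n):
--
--         while len(minQ) > 0 and A[minQ[-1]] >= A[i]:
--             minQ.pop()
--
--         if len(minQ) > 0 and minQ[0] <= i - B:
--             minQ.popleft()
--
--         while len(maxQ) > 0 and A[maxQ[-1]] <= A[i]:
--             maxQ.pop()
--
--         if len(maxQ) > 0 and maxQ[0] <= i - B: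
--             maxQ.popleft()
--
--         minQ.append(i)
--         maxQ.append(i)
--
--         if i >= B - 1:
--             s += A[minQ[0]] + A[maxQ[0]]
--             s = s % mod
--
--     return s
-- ===== SOURCE B (Python) =====
-- def solve(A, B):
--     n = len(A)
--     mod = pow(10, 9) + 7
--     w = max(B - 1, 0)
--     s = 0
--     for i in range(w, n):
--         window = A[i - w:i + 1]
--         s = (s + min(window) + max(window)) % mod
--     return s
-- ===== Notes on version B (the rewrite author's own statement) =====
-- stated objective: simpler
-- what changed: Replaced the two monotonic index deques by a direct scan that takes each window slice A[i-w:i+1] (w = max(B-1,0)) and adds min+max of the slice, keeping the same emission indices and per-step modulo.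
import Mathlib
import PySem

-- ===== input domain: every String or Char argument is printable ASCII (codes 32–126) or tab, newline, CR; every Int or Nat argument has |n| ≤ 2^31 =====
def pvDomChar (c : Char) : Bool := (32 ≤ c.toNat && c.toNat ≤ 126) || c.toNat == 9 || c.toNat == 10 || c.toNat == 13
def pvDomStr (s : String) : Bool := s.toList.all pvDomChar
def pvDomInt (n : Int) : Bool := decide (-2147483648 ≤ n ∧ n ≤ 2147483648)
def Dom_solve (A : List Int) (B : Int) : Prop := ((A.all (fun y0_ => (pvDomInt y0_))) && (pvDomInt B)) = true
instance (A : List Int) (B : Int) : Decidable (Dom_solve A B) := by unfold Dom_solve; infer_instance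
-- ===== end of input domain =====

-- B replaces A's two monotonic index deques by a direct per-window slice min/max scan
-- (same windows, same per-step modulo); objective: simpler, not faster.

-- ===== PORT A =====
def popBackWhile (p : Int → Bool) : List Int → List Int
  | [] => []
  | x :: xs =>
    match popBackWhile p xs with
    | [] => if p x then [] else [x]
    | y :: ys => x :: y :: ys

def popFrontIf (p : Int → Bool) : List Int → List Int
  | [] => []
  | x :: xs => if p x then xs else x :: xs

def pvMod : Int := 1000000007

-- one iteration of A's for-loop; all queue indices are in range, so the pyGetD default 0 is never taken
def solveStep (A : List Int) (B : Int) (st : (List Int × List Int) × Int) (i : Int) :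
    (List Int × List Int) × Int :=
  let minQ := popBackWhile (fun j => decide (PySem.List.pyGetD A j 0 ≥ PySem.List.pyGetD A i 0)) st.1.1
  let minQ := popFrontIf (fun j => decide (j ≤ i - B)) minQ
  let maxQ := popBackWhile (fun j => decide (PySem.List.pyGetD A j 0 ≤ PySem.List.pyGetD A i 0)) st.1.2
  let maxQ := popFrontIf (fun j => decide (j ≤ i - B)) maxQ
  let minQ := minQ ++ [i]
  let maxQ := maxQ ++ [i]
  let s := if i ≥ B - 1 then
      PySem.Int.mod (st.2 + PySem.List.pyGetD A (minQ.headD 0) 0 + PySem.List.pyGetD A (maxQ.headD 0) 0) pvMod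
    else st.2
  ((minQ, maxQ), s)

def solve (A : List Int) (B : Int) : Int :=
  ((PySem.List.pyRange 0 (A.length : Int) 1).foldl (solveStep A B) (([], []), 0)).2

-- ===== PORT B =====
-- one iteration of Source B's loop; the window is nonempty, so the getD 0 default is never taken
def solveAltStep (A : List Int) (B : Int) (s i : Int) : Int :=
  let w : Int := max (B - 1) 0
  let window := PySem.List.slice A (some (i - w)) (some (i + 1))
  PySem.Int.mod (s + (PySem.List.min? window (fun x => x)).getD 0
                   + (PySem.List.max? window (fun x => x)).getD 0) pvMod

def solve_alt (A : List Int) (B : Int) : Int :=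
  (PySem.List.pyRange (max (B - 1) 0) (A.length : Int) 1).foldl (solveAltStep A B) 0

-- ===== PRECONDITION & SPEC =====
def Spec_solve (A : List Int) (B : Int) (out : Int) : Prop := out = solve_alt A B
instance (A : List Int) (B : Int) (out : Int) : Decidable (Spec_solve A B out) := by unfold Spec_solve; infer_instance

-- ===== CLAIM (what is proved, stated in full; the proofs are below) =====
def Claim_equal_solve : Prop := ∀ (A : List Int) (B : Int), Dom_solve A B → Spec_solve A B (solve A B)

-- ===== LEMMAS AND PROOFS =====

theorem popBackWhile_eq_filter (p : Int → Bool) (l : List Int)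
    (h : l.Pairwise (fun x y => p x = true → p y = true)) :
    popBackWhile p l = l.filter (fun x => !p x) := by
  induction l with
  | nil => rfl
  | cons x xs ih =>
    rcases List.pairwise_cons.mp h with ⟨hx, hxs⟩
    have ih' := ih hxs
    rw [popBackWhile]
    rcases hfe : popBackWhile p xs with _ | ⟨y, ys⟩
    · have hall : xs.filter (fun x => !p x) = [] := by rw [← ih']; exact hfe
      by_cases hpx : p x = true
      · simp [hpx, hall]
      · simp [hpx, hall]
    · have hy : y ∈ xs.filter (fun x => !p x) := by rw [← ih', hfe]; exact List.mem_cons_self ..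
      have hymem := List.mem_filter.mp hy
      have hpx : p x = false := by
        by_contra hc
        have := hx y hymem.1 (by revert hc; simp)
        simp [this] at hymem
      simp [hpx, ← ih', hfe]

def keepQ (a : Nat → Int) (cmp : Int → Int → Bool) (w m j : Nat) : Bool :=
  decide (m ≤ j + w) && (List.range' (j + 1) (m - j)).all (fun k => cmp (a j) (a k))

def qspec (a : Nat → Int) (cmp : Int → Int → Bool) (w m : Nat) : List Nat :=
  (List.range (m + 1)).filter (keepQ a cmp w m)

theorem qspec_pairwise_lt (a : Nat → Int) (cmp : Int → Int → Bool) (w m : Nat) :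
    (qspec a cmp w m).Pairwise (· < ·) :=
  (List.pairwise_lt_range).filter _

theorem mem_qspec (a : Nat → Int) (cmp : Int → Int → Bool) (w m : Nat) (j : Nat) :
    j ∈ qspec a cmp w m ↔ j ≤ m ∧ m ≤ j + w ∧ ∀ k, j < k → k ≤ m → cmp (a j) (a k) = true := by
  simp only [qspec, List.mem_filter, List.mem_range, keepQ, Bool.and_eq_true, decide_eq_true_eq,
    List.all_eq_true, List.mem_range']
  constructor
  · rintro ⟨hj, hw, hall⟩
    exact ⟨by omega, hw, fun k hk1 hk2 => hall k ⟨k - (j+1), by omega, by omega⟩⟩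
  · rintro ⟨hj, hw, hall⟩
    exact ⟨by omega, hw, fun k ⟨i, hi, hk⟩ => hall k (by omega) (by omega)⟩

theorem qspec_chain (a : Nat → Int) (cmp : Int → Int → Bool) (w m : Nat) :
    (qspec a cmp w m).Pairwise (fun j k => cmp (a j) (a k) = true) := by
  have h := qspec_pairwise_lt a cmp w m
  rw [List.pairwise_iff_getElem] at h ⊢
  intro i j hi hj hij
  have hmemj : (qspec a cmp w m)[j] ∈ qspec a cmp w m := List.getElem_mem hj
  have hmemi : (qspec a cmp w m)[i] ∈ qspec a cmp w m := List.getElem_mem hi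
  rcases (mem_qspec ..).mp hmemi with ⟨_, _, hall⟩
  rcases (mem_qspec ..).mp hmemj with ⟨hjm, _, _⟩
  exact hall _ (h i j hi hj hij) hjm

theorem qspec_zero (a : Nat → Int) (cmp : Int → Int → Bool) (w : Nat) :
    qspec a cmp w 0 = [0] := by
  simp [qspec, List.range_one, keepQ]

theorem qspec_ne_nil (a : Nat → Int) (cmp : Int → Int → Bool) (w m : Nat) :
    qspec a cmp w m ≠ [] := by
  have : m ∈ qspec a cmp w m := (mem_qspec ..).mpr ⟨le_refl m, by omega, fun k h1 h2 => by omega⟩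
  exact List.ne_nil_of_mem this

theorem qspec_succ (a : Nat → Int) (cmp : Int → Int → Bool) (w m : Nat) :
    qspec a cmp w (m + 1)
      = (qspec a cmp w m).filter (fun j => cmp (a j) (a (m + 1)) && decide (m + 1 ≤ j + w))
        ++ [m + 1] := by
  have hK : keepQ a cmp w (m+1) (m+1) = true := by
    simp [keepQ]
  have hstep : ∀ j ∈ List.range (m+1), keepQ a cmp w (m+1) j
      = (keepQ a cmp w m j && (cmp (a j) (a (m+1)) && decide (m + 1 ≤ j + w))) := by
    intro j hj
    have hjm : j ≤ m := by simpa [Nat.lt_succ_iff] using List.mem_range.mp hj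
    have hr : List.range' (j+1) (m+1-j) = List.range' (j+1) (m-j) ++ [m+1] := by
      have h1 : m + 1 - j = (m - j) + 1 := by omega
      have h2 : j + 1 + (m - j) = m + 1 := by omega
      rw [h1, List.range'_concat]
      congr 1
      simp
      omega
    unfold keepQ
    rw [hr, List.all_append]
    simp only [List.all_cons, List.all_nil, Bool.and_true]
    by_cases h1 : m + 1 ≤ j + w
    · have h2 : m ≤ j + w := by omega
      simp [h1, h2]
    · simp [h1]
  calc qspec a cmp w (m+1)
      = (List.range (m+1)).filter (keepQ a cmp w (m+1)) ++ [m+1] := by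
        unfold qspec
        rw [List.range_succ, List.filter_append, List.filter_singleton, hK]
        rfl
    _ = _ := by
        rw [List.filter_congr hstep]
        unfold qspec
        rw [List.filter_filter]
        congr 1
        apply List.filter_congr
        intro j hj
        cases keepQ a cmp w m j <;> simp

theorem popFrontIf_eq_filter (t : Int) (l : List Int)
    (hs : l.Pairwise (· < ·)) (hlb : ∀ x ∈ l, t ≤ x + 1) :
    popFrontIf (fun x => decide (x ≤ t - 1)) l = l.filter (fun x => decide (t ≤ x)) := by
  cases l with
  | nil => rfl
  | cons x xs =>
    rcases List.pairwise_cons.mp hs with ⟨hx, _⟩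
    have hxs_ge : ∀ y ∈ xs, t ≤ y := by
      intro y hy
      have h1 := hlb x (List.mem_cons_self ..)
      have h2 := hx y hy
      omega
    have hfilter : xs.filter (fun x => decide (t ≤ x)) = xs :=
      List.filter_eq_self.mpr (fun y hy => by simpa using hxs_ge y hy)
    unfold popFrontIf
    by_cases hpx : x ≤ t - 1
    · have : ¬ (t ≤ x) := by omega
      simp [hpx, this, hfilter]
    · have : t ≤ x := by omega
      simp [hpx, this, hfilter]

def aOf (A : List Int) (j : Nat) : Int := A.getD j 0
def wOf (B : Int) : Nat := (max (B - 1) 0).toNat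

def qstate (a : Nat → Int) (cmp : Int → Int → Bool) (w : Nat) : Nat → List Int
  | 0 => []
  | m + 1 => (qspec a cmp w m).map (fun (j : Nat) => (j : Int))

theorem filter_map_cast (p : Int → Bool) (q : List Nat) :
    (q.map (fun (j : Nat) => (j : Int))).filter p
      = (q.filter (fun (j : Nat) => p (j : Int))).map (fun (j : Nat) => (j : Int)) := by
  induction q with
  | nil => rfl
  | cons x xs ih =>
    simp only [List.map_cons, List.filter_cons]
    cases hpx : p ((x : Nat) : Int) <;> simp [ih]

theorem pairwise_map_cast (R : Int → Int → Prop) (q : List Nat)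
    (h : q.Pairwise (fun (j k : Nat) => R (j : Int) (k : Int))) :
    (q.map (fun (j : Nat) => (j : Int))).Pairwise R := by
  induction q with
  | nil => exact List.Pairwise.nil
  | cons x xs ih =>
    rcases List.pairwise_cons.mp h with ⟨hx, hxs⟩
    refine List.pairwise_cons.mpr ⟨?_, ih hxs⟩
    intro y hy
    rcases List.mem_map.mp hy with ⟨j, hj, rfl⟩
    exact hx j hj

theorem queue_step (A : List Int) (B : Int) (cmp : Int → Int → Bool)
    (htrans : ∀ x y z, cmp x y = true → cmp y z = true → cmp x z = true)
    (p : Int → Bool) (m : Nat)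
    (hp : ∀ j : Nat, p (j : Int) = !cmp (aOf A j) (aOf A m)) :
    (popFrontIf (fun j => decide (j ≤ (m : Int) - B))
        (popBackWhile p (qstate (aOf A) cmp (wOf B) m))) ++ [(m : Int)]
      = qstate (aOf A) cmp (wOf B) (m + 1) := by
  set a := aOf A with ha
  set w := wOf B with hwdef
  cases m with
  | zero =>
    simp [qstate, qspec_zero, popBackWhile, popFrontIf]
  | succ m' =>
    have hq := qspec_chain a cmp w m'
    set q := qspec a cmp w m' with hqdef
    set mm : Nat := m' + 1 with hmm
    -- step 1: the while-pops are a filter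
    have hpair : (q.map (fun (j : Nat) => (j : Int))).Pairwise (fun x y => p x = true → p y = true) := by
      apply pairwise_map_cast
      refine hq.imp_of_mem ?_
      intro j k hj hk hjk
      rw [hp j, hp k]
      simp only [Bool.not_eq_true']
      intro hnj
      cases hvv : cmp (a k) (a mm) with
      | false => rfl
      | true => exact absurd (htrans _ _ _ hjk hvv) (by simp [hnj])
    have hpw : popBackWhile p (q.map (fun (j : Nat) => (j : Int)))
        = (q.filter (fun j => cmp (a j) (a mm))).map (fun (j : Nat) => (j : Int)) := by
      rw [popBackWhile_eq_filter p _ hpair, filter_map_cast]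
      congr 1
      apply List.filter_congr
      intro j _
      rw [hp j, Bool.not_not]
    rw [qstate, hpw]
    set G := q.filter (fun j => cmp (a j) (a mm)) with hGdef
    have hGsub : ∀ j ∈ G, j ∈ q := fun j hj => (List.mem_filter.mp hj).1
    have hGlt : G.Pairwise (fun j k => j < k) := (qspec_pairwise_lt a cmp w m').filter _
    -- step 2: the popleft is the window filter
    have hfront : popFrontIf (fun j => decide (j ≤ (mm : Int) - B)) (G.map (fun (j : Nat) => (j : Int)))
        = (G.filter (fun j => decide (mm ≤ j + w))).map (fun (j : Nat) => (j : Int)) := by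
      by_cases hB : 1 ≤ B
      · have hwB : (w : Int) = B - 1 := by
          rw [hwdef]; unfold wOf
          rw [max_eq_left (by omega)]
          exact Int.toNat_of_nonneg (by omega)
        have hpred : (fun j : Int => decide (j ≤ (mm : Int) - B))
            = (fun x : Int => decide (x ≤ ((mm : Int) - (w : Int)) - 1)) := by
          funext x
          simp only [decide_eq_decide]
          omega
        rw [hpred, popFrontIf_eq_filter ((mm : Int) - (w : Int))]
        · rw [filter_map_cast]
          congr 1
          apply List.filter_congr
          intro j _
          simp only [decide_eq_decide]
          omega
        · exact pairwise_map_cast _ _ (hGlt.imp (by intro j k h; exact_mod_cast h))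
        · intro x hx
          rcases List.mem_map.mp hx with ⟨j, hj, rfl⟩
          have := (mem_qspec a cmp w m' j).mp (hGsub j hj)
          omega
      · -- B ≤ 0: w = 0, the queue is at most [m'], popleft always fires, window filter empties
        have hw0 : w = 0 := by rw [hwdef]; unfold wOf; omega
        have hGm : ∀ j ∈ G, j = m' := by
          intro j hj
          have := (mem_qspec a cmp w m' j).mp (hGsub j hj)
          omega
        have hGcases : G = [] ∨ G = [m'] := by
          cases hGe : G with
          | nil => exact Or.inl rfl
          | cons g gs =>
            right
            have hg : g = m' := hGm g (by rw [hGe]; exact List.mem_cons_self ..)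
            have hgs : gs = [] := by
              rw [hGe] at hGlt
              rcases List.pairwise_cons.mp hGlt with ⟨hglt, _⟩
              cases hgse : gs with
              | nil => rfl
              | cons e es =>
                have he : e = m' := hGm e (by rw [hGe, hgse]; simp)
                have := hglt e (by rw [hgse]; simp)
                omega
            rw [hg, hgs]
        rcases hGcases with h | h <;> rw [h]
        · rfl
        · have hc1 : ((m' : Int) ≤ (mm : Int) - B) := by omega
          have hc2 : ¬ (mm ≤ m' + w) := by omega
          simp [popFrontIf, hc1, hc2]
    rw [hfront, qstate, qspec_succ, List.map_append]
    congr 2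
    rw [hGdef, List.filter_filter]
    apply List.filter_congr
    intro j _
    cases cmp (a j) (a (m' + 1)) <;> simp <;> omega

theorem qspec_head_least (a : Nat → Int) (cmp : Int → Int → Bool) (w m h : Nat)
    (hh : (qspec a cmp w m).head? = some h) :
    h ∈ qspec a cmp w m ∧ ∀ j ∈ qspec a cmp w m, h ≤ j := by
  have hmem : h ∈ qspec a cmp w m := List.mem_of_mem_head? hh
  refine ⟨hmem, ?_⟩
  have hpl := qspec_pairwise_lt a cmp w m
  cases hq : qspec a cmp w m with
  | nil => simp [hq] at hh
  | cons x xs =>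
    rw [hq] at hh hpl
    simp only [List.head?_cons, Option.some_inj] at hh
    subst hh
    intro j hj
    rcases List.mem_cons.mp hj with rfl | hj'
    · exact le_refl _
    · exact le_of_lt ((List.pairwise_cons.mp hpl).1 j hj')

theorem qspec_head_le (a : Nat → Int) (cmp : Int → Int → Bool) (le : Int → Int → Prop)
    (hrefl : ∀ x, le x x) (htrans : ∀ x y z, le x y → le y z → le x z)
    (hc : ∀ x y, cmp x y = true → le x y) (hnc : ∀ x y, cmp x y = false → le y x)
    (w m h : Nat) (hh : (qspec a cmp w m).head? = some h) :
    ∀ j, m ≤ j + w → j ≤ m → le (a h) (a j) := by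
  obtain ⟨hmem, hleast⟩ := qspec_head_least a cmp w m h hh
  rcases (mem_qspec a cmp w m h).mp hmem with ⟨hhm, hhw, hhall⟩
  -- downward strong induction on the window
  have key : ∀ d j, m ≤ j + w → j ≤ m → m - j ≤ d → le (a h) (a j) := by
    intro d
    induction d with
    | zero =>
      intro j _ hjm hd
      have : j = m := by omega
      subst this
      rcases Nat.lt_or_ge h j with hlt | hge
      · exact hc _ _ (hhall j hlt (le_refl _))
      · have : h = j := by omega
        rw [this]
        exact hrefl _
    | succ d ih =>
      intro j hjw hjm hd
      rcases Nat.lt_or_ge h j with hlt | hge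
      · exact hc _ _ (hhall j hlt hjm)
      · rcases Nat.eq_or_lt_of_le hge with rfl | hjh
        · exact hrefl _
        · -- j < h : j is not in the queue, so some later k has cmp (a j) (a k) = false
          have hnotmem : j ∉ qspec a cmp w m := fun hmem' => by
            have := hleast j hmem'
            omega
          have : ¬ (j ≤ m ∧ m ≤ j + w ∧ ∀ k, j < k → k ≤ m → cmp (a j) (a k) = true) := by
            intro hcon
            exact hnotmem ((mem_qspec a cmp w m j).mpr hcon)
          rw [not_and] at this
          simp only [not_and, not_forall] at this
          rcases this hjm hjw with ⟨k, hk1, hk2, hkf⟩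
          have hkf' : cmp (a j) (a k) = false := by
            cases hkk : cmp (a j) (a k)
            · rfl
            · exact absurd hkk hkf
          have hkle : le (a k) (a j) := hnc _ _ hkf'
          have hkh : le (a h) (a k) := ih k (by omega) hk2 (by omega)
          exact htrans _ _ _ hkh hkle
  intro j hjw hjm
  exact key (m - j) j hjw hjm (le_refl _)

theorem slice_eq_map_range (A : List Int) (w m : Nat) (hwm : w ≤ m) (hm : m < A.length) :
    PySem.List.slice A (some ((m : Int) - (w : Int))) (some ((m : Int) + 1))
      = (List.range' (m - w) (w + 1)).map (aOf A) := by
  have h1 : ((m : Int) - (w : Int)) = ((m - w : Nat) : Int) := by omega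
  have h2 : ((m : Int) + 1) = ((m + 1 : Nat) : Int) := by push_cast; ring
  rw [h1, h2, PySem.List.slice_natCast]
  apply List.ext_getElem
  · simp [List.length_take, List.length_drop]
    omega
  · intro i hi1 hi2
    simp only [List.getElem_take, List.getElem_drop, List.getElem_map, List.getElem_range']
    have hi2' : i < w + 1 := by simpa using hi2
    have h4 : m - w + 1 * i < A.length := by omega
    simp only [aOf]
    rw [List.getD_eq_getElem _ _ h4]
    congr 1
    omega

theorem mem_window_of_qspec_head (A : List Int) (cmp : Int → Int → Bool) (w m h : Nat)
    (hw : w ≤ m) (hq : h ∈ qspec (aOf A) cmp w m) :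
    h ∈ List.range' (m - w) (w + 1) := by
  rcases (mem_qspec ..).mp hq with ⟨h1, h2, _⟩
  refine List.mem_range'_1.mpr ⟨by omega, by omega⟩

theorem min_window_eq (A : List Int) (w m h : Nat) (hw : w ≤ m) (hm : m < A.length)
    (rest : List Nat)
    (hq : qspec (aOf A) (fun x y => decide (x < y)) w m = h :: rest) :
    (PySem.List.min? (PySem.List.slice A (some ((m : Int) - (w : Int))) (some ((m : Int) + 1)))
        (fun x => x)).getD 0 = aOf A h := by
  rw [slice_eq_map_range A w m hw hm]
  set S := (List.range' (m - w) (w + 1)).map (aOf A) with hS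
  have hh : (qspec (aOf A) (fun x y => decide (x < y)) w m).head? = some h := by
    rw [hq]; rfl
  have hhmem : h ∈ qspec (aOf A) (fun x y => decide (x < y)) w m := by
    rw [hq]; exact List.mem_cons_self ..
  have hhS : aOf A h ∈ S := List.mem_map_of_mem (mem_window_of_qspec_head A _ w m h hw hhmem)
  have hle : ∀ y ∈ S, aOf A h ≤ y := by
    intro y hy
    rcases List.mem_map.mp hy with ⟨j, hj, rfl⟩
    rcases List.mem_range'_1.mp hj with ⟨hj1, hj2⟩
    exact qspec_head_le (aOf A) _ (· ≤ ·) (fun x => le_refl x)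
      (fun x y z => le_trans)
      (fun x y hxy => le_of_lt (by simpa using hxy))
      (fun x y hxy => by simpa using hxy)
      w m h hh j (by omega) (by omega)
  have hne : S ≠ [] := by
    simp [hS]
  rcases hmin : PySem.List.min? S (fun x => x) with _ | v
  · exact absurd ((PySem.List.min?_eq_none_iff S (fun x => x)).mp hmin) hne
  · have hvmem := PySem.List.min?_mem hmin
    have hvmin := PySem.List.min?_isMin hmin
    simp only [Option.getD_some]
    exact (le_antisymm (hle v hvmem) (hvmin _ hhS)).symm

theorem max_window_eq (A : List Int) (w m h : Nat) (hw : w ≤ m) (hm : m < A.length)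
    (rest : List Nat)
    (hq : qspec (aOf A) (fun x y => decide (y < x)) w m = h :: rest) :
    (PySem.List.max? (PySem.List.slice A (some ((m : Int) - (w : Int))) (some ((m : Int) + 1)))
        (fun x => x)).getD 0 = aOf A h := by
  rw [slice_eq_map_range A w m hw hm]
  set S := (List.range' (m - w) (w + 1)).map (aOf A) with hS
  have hh : (qspec (aOf A) (fun x y => decide (y < x)) w m).head? = some h := by
    rw [hq]; rfl
  have hhmem : h ∈ qspec (aOf A) (fun x y => decide (y < x)) w m := by
    rw [hq]; exact List.mem_cons_self ..
  have hhS : aOf A h ∈ S := List.mem_map_of_mem (mem_window_of_qspec_head A _ w m h hw hhmem)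
  have hge : ∀ y ∈ S, y ≤ aOf A h := by
    intro y hy
    rcases List.mem_map.mp hy with ⟨j, hj, rfl⟩
    rcases List.mem_range'_1.mp hj with ⟨hj1, hj2⟩
    exact qspec_head_le (aOf A) _ (fun x y => y ≤ x) (fun x => le_refl x)
      (fun x y z hxy hyz => le_trans hyz hxy)
      (fun x y hxy => le_of_lt (by simpa using hxy))
      (fun x y hxy => by simpa using hxy)
      w m h hh j (by omega) (by omega)
  have hne : S ≠ [] := by
    simp [hS]
  rcases hmax : PySem.List.max? S (fun x => x) with _ | v
  · exact absurd ((PySem.List.max?_eq_none_iff S (fun x => x)).mp hmax) hne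
  · have hvmem := PySem.List.max?_mem hmax
    have hvmax := PySem.List.max?_isMax hmax
    simp only [Option.getD_some]
    exact (le_antisymm (hvmax _ hhS) (hge v hvmem)).symm

theorem wOf_cast (B : Int) : ((wOf B : Nat) : Int) = max (B - 1) 0 := by
  unfold wOf
  exact Int.toNat_of_nonneg (by omega)

theorem fold_inv (A : List Int) (B : Int) (m : Nat) (hm : m ≤ A.length) :
    (PySem.List.pyRange 0 (m : Int) 1).foldl (solveStep A B) (([], []), 0)
      = ((qstate (aOf A) (fun x y => decide (x < y)) (wOf B) m,
          qstate (aOf A) (fun x y => decide (y < x)) (wOf B) m),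
         (PySem.List.pyRange (max (B - 1) 0) (m : Int) 1).foldl (solveAltStep A B) 0) := by
  induction m with
  | zero =>
    rw [PySem.List.pyRange_one_eq_nil (by omega), PySem.List.pyRange_one_eq_nil (by omega)]
    rfl
  | succ m ih =>
    have hm' : m ≤ A.length := by omega
    have hcast : ((m + 1 : Nat) : Int) = (m : Int) + 1 := by push_cast; ring
    rw [hcast, PySem.List.pyRange_one_succ_right (by omega), List.foldl_append, ih hm',
      List.foldl_cons, List.foldl_nil]
    -- the queue components
    have hqmin := queue_step A B (fun x y => decide (x < y))
      (fun x y z hxy hyz => by simp at *; omega)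
      (fun j => decide (PySem.List.pyGetD A j 0 ≥ PySem.List.pyGetD A (m : Int) 0)) m
      (fun j => by
        simp only [PySem.List.pyGetD_natCast, aOf, ← decide_not, decide_eq_decide, ge_iff_le]
        omega)
    have hqmax := queue_step A B (fun x y => decide (y < x))
      (fun x y z hxy hyz => by simp at *; omega)
      (fun j => decide (PySem.List.pyGetD A j 0 ≤ PySem.List.pyGetD A (m : Int) 0)) m
      (fun j => by
        simp only [PySem.List.pyGetD_natCast, aOf, ← decide_not, decide_eq_decide]
        omega)
    simp only [solveStep]
    rw [hqmin, hqmax]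
    by_cases hemit : wOf B ≤ m
    · -- an emitting step: both sides add the same value
      have hmlt : m < A.length := by omega
      have hBm : ((m : Int) ≥ B - 1) := by
        have := wOf_cast B
        have h2 : (wOf B : Int) ≤ (m : Int) := by exact_mod_cast hemit
        omega
      have hwm : max (B - 1) 0 ≤ (m : Int) := by
        have := wOf_cast B
        have h2 : (wOf B : Int) ≤ (m : Int) := by exact_mod_cast hemit
        omega
      rw [PySem.List.pyRange_one_succ_right hwm, List.foldl_append, List.foldl_cons, List.foldl_nil]
      rw [if_pos hBm]
      congr 1
      -- now the emitted values coincide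
      rcases List.exists_cons_of_ne_nil
        (qspec_ne_nil (aOf A) (fun x y => decide (x < y)) (wOf B) m) with ⟨hmn, rmn, hqn⟩
      rcases List.exists_cons_of_ne_nil
        (qspec_ne_nil (aOf A) (fun x y => decide (y < x)) (wOf B) m) with ⟨hmx, rmx, hqx⟩
      rw [solveAltStep]
      have hslice : (m : Int) - max (B - 1) 0 = (m : Int) - (wOf B : Int) := by
        rw [wOf_cast]
      rw [hslice]
      rw [min_window_eq A (wOf B) m hmn hemit hmlt rmn hqn,
          max_window_eq A (wOf B) m hmx hemit hmlt rmx hqx]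
      rw [qstate, qstate, hqn, hqx]
      simp [PySem.List.pyGetD_natCast, aOf]
    · -- no emission yet (m < B - 1): B's range is still empty
      have hBm : ¬ ((m : Int) ≥ B - 1) := by
        have := wOf_cast B
        have h2 : ¬ ((wOf B : Int) ≤ (m : Int)) := by exact_mod_cast hemit
        omega
      have hr1 : PySem.List.pyRange (max (B - 1) 0) ((m : Int) + 1) 1 = [] :=
        PySem.List.pyRange_one_eq_nil (by omega)
      have hr2 : PySem.List.pyRange (max (B - 1) 0) (m : Int) 1 = [] :=
        PySem.List.pyRange_one_eq_nil (by omega)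
      rw [hr1, hr2, if_neg hBm]

theorem solve_eq_solve_alt (A : List Int) (B : Int) : solve A B = solve_alt A B := by
  unfold solve solve_alt
  rw [fold_inv A B A.length (le_refl _)]

-- ===== VERDICT (by name: the statement is the Claim_ definition above) =====
theorem solve_spec : Claim_equal_solve := by
  intro A B _
  unfold Spec_solve
  exact solve_eq_solve_alt A B
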